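-- pv_equiv track=rewrite | github.com/haoxuansxx/MachineLearning | moviesScore/moviesDataUtils.py | cloumnManyKeyListSemicolon
-- ===== SOURCE A (Python) =====
-- def cloumnManyKeyListSemicolon(dataList):
--     dataKey = {}
--     for datas in dataList:  # 语言
--         dataL = datas.split(";")
--         for data in dataL:
--             if data in dataKey:
--                 dataKey[data] += 1
--             else:
--                 dataKey[data] = 1
--         pass
--     pass
--     return dataKey
-- ===== SOURCE B (Python) =====
-- def cloumnManyKeyListSemicolon(dataList):
--     # Flatten all semicolon-split tokens, then emit each distinct token
--     # (in first-occurrence order) with its total count.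
--     tokens = []
--     for s in dataList:
--         tokens.extend(s.split(";"))
--     return {t: tokens.count(t) for t in dict.fromkeys(tokens)}
-- ===== Notes on version B (the rewrite author's own statement) =====
-- stated objective: alternative
-- what changed: Replaces the incremental hash-map accumulation (membership test + increment per token) by flattening all tokens once and building the result from the deduplicated token list with a count per distinct token.
import Mathlib
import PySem

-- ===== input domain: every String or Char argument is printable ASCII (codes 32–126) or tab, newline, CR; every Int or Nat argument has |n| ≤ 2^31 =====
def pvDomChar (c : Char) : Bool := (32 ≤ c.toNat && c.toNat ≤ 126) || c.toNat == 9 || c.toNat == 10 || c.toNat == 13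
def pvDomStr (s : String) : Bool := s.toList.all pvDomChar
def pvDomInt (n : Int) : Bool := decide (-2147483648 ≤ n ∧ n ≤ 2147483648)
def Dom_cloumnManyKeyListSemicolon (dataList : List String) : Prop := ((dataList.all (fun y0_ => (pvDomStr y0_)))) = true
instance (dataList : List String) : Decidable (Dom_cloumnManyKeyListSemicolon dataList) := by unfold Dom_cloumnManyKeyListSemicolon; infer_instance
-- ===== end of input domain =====

-- B flattens all semicolon-split tokens once and builds the result from the deduplicated
-- token list with a count per distinct token, instead of A's incremental dict accumulation
-- (objective: alternative decomposition, same return value).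

-- ===== PORT A =====
def cloumnManyKeyListSemicolon (dataList : List String) : List (String × Int) :=
  (dataList.foldl (fun dataKey datas =>
      ((PySem.Str.split? datas ";").getD []).foldl (fun dk data =>
        if dk.contains data then dk.insert data (dk.getD data 0 + 1)
        else dk.insert data 1) dataKey)
    PySem.Dict.empty).items

-- ===== PORT B =====
def cloumnManyKeyListSemicolon_alt (dataList : List String) : List (String × Int) :=
  let tokens := dataList.flatMap (fun s => (PySem.Str.split? s ";").getD [])
  (PySem.List.dedup tokens).map (fun t => (t, (tokens.count t : Int)))

-- ===== PRECONDITION & SPEC =====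
def Spec_cloumnManyKeyListSemicolon (dataList : List String) (out : List (String × Int)) : Prop := out = cloumnManyKeyListSemicolon_alt dataList
instance (dataList : List String) (out : List (String × Int)) : Decidable (Spec_cloumnManyKeyListSemicolon dataList out) := by unfold Spec_cloumnManyKeyListSemicolon; infer_instance

-- ===== CLAIM (what is proved, stated in full; the proofs are below) =====
def Claim_equal_cloumnManyKeyListSemicolon : Prop := ∀ (dataList : List String), Dom_cloumnManyKeyListSemicolon dataList → Spec_cloumnManyKeyListSemicolon dataList (cloumnManyKeyListSemicolon dataList)

-- ===== LEMMAS AND PROOFS =====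

-- A's branch on membership is exactly the unconditional "insert with getD + 1" step.
theorem pv_step_eq :
    (fun (dk : PySem.Dict String Int) (data : String) =>
      if dk.contains data then dk.insert data (dk.getD data 0 + 1)
      else dk.insert data 1)
    = (fun (dk : PySem.Dict String Int) (data : String) =>
        dk.insert data (dk.getD data 0 + 1)) := by
  funext dk data
  by_cases h : dk.contains data
  · simp [h]
  · simp [h, PySem.Dict.getD_of_not_contains dk 0 (by simpa using h)]

-- ===== VERDICT (by name: the statement is the Claim_ definition above) =====
theorem cloumnManyKeyListSemicolon_spec : Claim_equal_cloumnManyKeyListSemicolon := by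
  intro dataList _
  show _ = _
  unfold cloumnManyKeyListSemicolon cloumnManyKeyListSemicolon_alt
  rw [pv_step_eq, ← List.foldl_flatMap, PySem.Dict.foldl_insert_getD_add_one_eq_counter,
    PySem.Dict.items_counter]
  simp
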